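-- pv_equiv track=rewrite | github.com/mounicabhogadi/DataStructures | Python/Functions/Factorial.py | factorial_best
-- ===== SOURCE A (Python) =====
-- def factorial_best(num):
--     fact = {0: 1, 1: 1}
--     result = []
--
--     for i in range(2, num + 1):
--         fact[i] = fact[i - 1] * i
--
--     for i in range(num, 0, -1):
--         result.append(f"{i}! = {fact[i]}")
--
--     return result
-- ===== SOURCE B (Python) =====
-- def factorial_best(num):
--     # compute num! once as a running product, then divide down
--     current = 1
--     for i in range(2, num + 1):
--         current *= i
--     result = []
--     for i in range(num, 0, -1):
--         result.append(f"{i}! = {current}")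
--         current //= i
--     return result
-- ===== Notes on version B (the rewrite author's own statement) =====
-- stated objective: simpler
-- what changed: B keeps no dict/table of factorials: it computes num! as one running product and then divides the single accumulator down by i while emitting the lines from num to 1.
import Mathlib
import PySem

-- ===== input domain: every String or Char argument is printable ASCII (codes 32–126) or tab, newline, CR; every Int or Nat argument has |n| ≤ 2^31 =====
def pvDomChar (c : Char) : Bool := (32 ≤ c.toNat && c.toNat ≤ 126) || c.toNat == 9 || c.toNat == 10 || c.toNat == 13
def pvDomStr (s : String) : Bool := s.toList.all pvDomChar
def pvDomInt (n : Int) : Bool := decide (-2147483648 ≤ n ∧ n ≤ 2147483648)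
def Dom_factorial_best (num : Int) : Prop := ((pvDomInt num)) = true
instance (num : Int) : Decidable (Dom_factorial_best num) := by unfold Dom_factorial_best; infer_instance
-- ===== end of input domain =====

-- B drops A's dict of all factorials: one running product for num!, then one
-- accumulator divided down while the lines are emitted (objective: simpler).

-- ===== PORT A =====
def factorial_best (num : Int) : List String :=
  let fact : PySem.Dict Int Int := PySem.Dict.ofList [(0, 1), (1, 1)]
  let fact := (PySem.List.pyRange 2 (num + 1) 1).foldl
    (fun d i => d.insert i (d.getD (i - 1) 0 * i)) fact
  (PySem.List.pyRange num 0 (-1)).foldl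
    (fun result i =>
      result ++ [PySem.Int.toStr i ++ "! = " ++ PySem.Int.toStr (fact.getD i 0)]) []

-- ===== PORT B =====
def factorial_best_alt (num : Int) : List String :=
  let current : Int := (PySem.List.pyRange 2 (num + 1) 1).foldl (fun c i => c * i) 1
  ((PySem.List.pyRange num 0 (-1)).foldl
    (fun st i =>
      (st.1 ++ [PySem.Int.toStr i ++ "! = " ++ PySem.Int.toStr st.2],
       PySem.Int.floordiv st.2 i)) ([], current)).1

-- ===== PRECONDITION & SPEC =====
def Spec_factorial_best (num : Int) (out : List String) : Prop := out = factorial_best_alt num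
instance (num : Int) (out : List String) : Decidable (Spec_factorial_best num out) := by unfold Spec_factorial_best; infer_instance

-- ===== CLAIM (what is proved, stated in full; the proofs are below) =====
def Claim_equal_factorial_best : Prop := ∀ (num : Int), Dom_factorial_best num → Spec_factorial_best num (factorial_best num)

-- ===== LEMMAS AND PROOFS =====

def pvFac : Nat → Int
  | 0 => 1
  | n + 1 => pvFac n * (n + 1)

def pvD0 : PySem.Dict Int Int := PySem.Dict.ofList [(0, 1), (1, 1)]

-- the dict built by A's first loop holds pvFac at every key 0..n
theorem pv_dict_lemma (n : Nat) :
    ∀ (i : Int), 0 ≤ i → i ≤ 1 + n →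
    ((PySem.List.pyRange 2 (1 + (n : Int) + 1) 1).foldl
      (fun d i => d.insert i (d.getD (i - 1) 0 * i)) pvD0).getD i 0 = pvFac i.toNat := by
  induction n with
  | zero =>
    intro i h0 h1
    rw [PySem.List.pyRange_one_eq_nil (by norm_num)]
    have : i = 0 ∨ i = 1 := by omega
    rcases this with h | h <;> subst h <;> decide
  | succ n ih =>
    intro i h0 h1
    have hb : (1 + ((n + 1 : Nat) : Int) + 1) = (1 + (n : Int) + 1) + 1 := by push_cast; ring
    rw [hb, PySem.List.pyRange_one_succ_right (by omega), List.foldl_append]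
    simp only [List.foldl_cons, List.foldl_nil]
    rw [PySem.Dict.getD_insert]
    by_cases hi : i = 1 + (n : Int) + 1
    · simp only [hi, if_pos rfl]
      have h1' : (1 + (n : Int) + 1) - 1 = 1 + (n : Int) := by ring
      rw [h1', ih (1 + (n : Int)) (by omega) (by omega)]
      have ht1 : ((1 : Int) + (n : Int)).toNat = n + 1 := by omega
      have ht2 : ((1 : Int) + (n : Int) + 1).toNat = n + 2 := by omega
      rw [ht1, ht2]
      show pvFac (n + 1) * (1 + (n : Int) + 1) = pvFac (n + 2)
      have : pvFac (n + 2) = pvFac (n + 1) * ((n + 1) + 1) := rfl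
      rw [this]; push_cast; ring
    · rw [if_neg hi]
      exact ih i h0 (by omega)

-- a foldl that appends singletons is append-of-map
theorem pv_foldl_append_map (l : List Int) (f : Int → String) (acc : List String) :
    l.foldl (fun r i => r ++ [f i]) acc = acc ++ l.map f := by
  induction l generalizing acc with
  | nil => simp
  | cons x xs ih => simp [ih]

-- A's product loop computes pvFac
theorem pv_prod_lemma (n : Nat) :
    (PySem.List.pyRange 2 ((n : Int) + 1) 1).foldl (fun c i => c * i) 1 = pvFac n := by
  induction n with
  | zero => rw [PySem.List.pyRange_one_eq_nil (by norm_num)]; rfl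
  | succ n ih =>
    match n, ih with
    | 0, _ => rw [PySem.List.pyRange_one_eq_nil (by norm_num)]; rfl
    | Nat.succ m, ih =>
      have hb : (((m + 1 + 1 : Nat) : Int) + 1) = (((m + 1 : Nat) : Int) + 1) + 1 := by
        push_cast; ring
      rw [hb, PySem.List.pyRange_one_succ_right (by push_cast; omega), List.foldl_append, ih]
      simp only [List.foldl_cons, List.foldl_nil]
      show pvFac (m + 1) * (((m + 1 : Nat) : Int) + 1) = pvFac (m + 2)
      have : pvFac (m + 2) = pvFac (m + 1) * ((m + 1) + 1) := rfl
      rw [this]; push_cast; ring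

-- B's countdown loop divides pvFac k down step by step
theorem pv_bloop (k : Nat) :
    ∀ (acc : List String),
    ((PySem.List.pyRange (k : Int) 0 (-1)).foldl
      (fun (st : List String × Int) i =>
        (st.1 ++ [PySem.Int.toStr i ++ "! = " ++ PySem.Int.toStr st.2],
         PySem.Int.floordiv st.2 i)) (acc, pvFac k)).1
    = acc ++ (PySem.List.pyRange (k : Int) 0 (-1)).map
        (fun i => PySem.Int.toStr i ++ "! = " ++ PySem.Int.toStr (pvFac i.toNat)) := by
  induction k with
  | zero =>
    intro acc
    rw [PySem.List.pyRange_neg_one_eq_nil (by norm_num)]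
    simp
  | succ k ih =>
    intro acc
    rw [PySem.List.pyRange_neg_one_cons (by push_cast; omega)]
    simp only [List.foldl_cons, List.map_cons]
    have hdn : ((k + 1 : Nat) : Int) - 1 = (k : Nat) := by push_cast; ring
    have hdiv : PySem.Int.floordiv (pvFac (k + 1)) ((k + 1 : Nat) : Int) = pvFac k := by
      rw [PySem.Int.floordiv_eq_iff_of_pos (by push_cast; omega)]
      constructor
      · show pvFac k * ((k + 1 : Nat) : Int) ≤ pvFac (k + 1)
        have : pvFac (k + 1) = pvFac k * ((k : Nat) + 1) := rfl
        rw [this]; push_cast; omega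
      · show pvFac (k + 1) < (pvFac k + 1) * ((k + 1 : Nat) : Int)
        have : pvFac (k + 1) = pvFac k * ((k : Nat) + 1) := rfl
        rw [this]; push_cast; nlinarith [pvFac k]
    rw [hdn, hdiv, ih]
    have ht : ((k + 1 : Nat) : Int).toNat = k + 1 := by omega
    rw [ht]
    simp

-- ===== VERDICT (by name: the statement is the Claim_ definition above) =====
theorem factorial_best_spec : Claim_equal_factorial_best := by
  intro num _
  unfold Spec_factorial_best factorial_best factorial_best_alt
  by_cases h : num ≤ 0
  · rw [PySem.List.pyRange_neg_one_eq_nil h]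
    simp
  · push_neg at h
    obtain ⟨m, hm⟩ : ∃ m : Nat, num = ((m + 1 : Nat) : Int) := ⟨(num - 1).toNat, by omega⟩
    subst hm
    have hb : (((m + 1 : Nat) : Int) + 1) = 1 + (m : Int) + 1 := by push_cast; ring
    simp only [hb, pv_foldl_append_map, List.nil_append]
    have hb' : (1 + (m : Int) + 1) = (((m + 1 : Nat) : Int) + 1) := by push_cast; ring
    rw [show ((PySem.List.pyRange 2 (1 + (m : Int) + 1) 1).foldl (fun c i => c * i) 1)
          = pvFac (m + 1) by rw [hb']; exact pv_prod_lemma (m + 1)]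
    rw [pv_bloop (m + 1) [], List.nil_append]
    apply List.map_congr_left
    intro i hi
    rw [PySem.List.mem_pyRange_neg_one] at hi
    have hd := pv_dict_lemma m i (by omega) (by push_cast at hi ⊢; omega)
    unfold pvD0 at hd
    rw [hd]
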